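-- pv_equiv track=rewrite | github.com/canonical/operator-libs-linux | lib/charms/operator_libs_linux/v0/apt.py | _iter_deb822_stanzas
-- ===== SOURCE A (Python) =====
-- from typing import Any, Iterable, Iterator, Literal, Mapping
--
-- def _iter_deb822_stanzas(lines: Iterable[str]) -> Iterator[list[tuple[int, str]]]:
--     """Given lines from a deb822 format file, yield a stanza of lines.
--
--     Args:
--         lines: an iterable of lines from a deb822 sources file
--
--     Yields:
--         lists of numbered lines (a tuple of line number and line) that make up
--         a deb822 stanza, with comments stripped out (but accounted for in line numbering)
--     """
--     current_stanza: list[tuple[int, str]] = []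
--     for n, line in enumerate(lines, start=1):  # 1 indexed line numbers
--         if not line.strip():  # blank lines separate stanzas
--             if current_stanza:
--                 yield current_stanza
--                 current_stanza = []
--             continue
--         content, _delim, _comment = line.partition("#")
--         if content.strip():  # skip (potentially indented) comment line
--             current_stanza.append((n, content.rstrip()))  # preserve indent
--     if current_stanza:
--         yield current_stanza
-- ===== SOURCE B (Python) =====
-- from itertools import groupby
--
--
-- def _iter_deb822_stanzas(lines):
--     numbered = enumerate(lines, start=1)  # 1 indexed line numbers
--     for nonblank, group in groupby(numbered, key=lambda nl: bool(nl[1].strip())):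
--         if not nonblank:
--             continue  # a run of blank lines is a separator, not a stanza
--         stanza = []
--         for n, line in group:
--             content = line.partition("#")[0]
--             if content.strip():
--                 stanza.append((n, content.rstrip()))
--         if stanza:  # an all-comment block yields nothing
--             yield stanza
-- ===== Notes on version B (the rewrite author's own statement) =====
-- stated objective: alternative
-- what changed: Replaces the explicit current_stanza accumulator with flush-on-blank by an itertools.groupby pipeline: enumerate first, split the numbered stream into blank/non-blank runs, then map-and-filter each non-blank block into a stanza, skipping empty results.
import Mathlib
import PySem

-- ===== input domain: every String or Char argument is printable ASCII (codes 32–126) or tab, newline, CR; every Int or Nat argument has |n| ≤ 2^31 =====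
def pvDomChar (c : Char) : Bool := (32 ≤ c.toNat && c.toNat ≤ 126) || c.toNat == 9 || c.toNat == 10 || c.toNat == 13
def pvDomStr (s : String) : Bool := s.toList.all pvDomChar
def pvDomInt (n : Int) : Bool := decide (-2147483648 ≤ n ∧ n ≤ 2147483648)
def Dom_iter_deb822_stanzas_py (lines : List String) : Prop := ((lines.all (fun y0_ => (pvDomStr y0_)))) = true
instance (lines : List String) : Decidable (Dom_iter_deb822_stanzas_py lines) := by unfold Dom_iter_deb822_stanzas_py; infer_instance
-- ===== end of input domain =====

-- B replaces A's explicit current_stanza accumulator (flush on blank lines) by a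
-- group-then-filter pipeline (enumerate, split into blank-separated blocks, map each
-- block to a stanza, drop empty ones): an alternative decomposition, same cost.

-- line.partition("#")[0]: hand port, exact because the separator "#" is a single character
def pvBeforeHash (s : String) : String := String.ofList (s.toList.takeWhile (· ≠ '#'))

-- ===== PORT A =====
-- the generator's loop: state = current_stanza; a yield prepends to the result stream
def pvALoop : List (Int × String) → List (Int × String) → List (List (Int × String))
  | cur, [] => if cur.isEmpty then [] else [cur]
  | cur, (n, line) :: rest =>
    if PySem.Str.strip line = "" then
      (if cur.isEmpty then pvALoop [] rest else cur :: pvALoop [] rest)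
    else
      let content := pvBeforeHash line
      if PySem.Str.strip content ≠ "" then
        pvALoop (cur ++ [(n, PySem.Str.rstrip content)]) rest
      else
        pvALoop cur rest

def iter_deb822_stanzas_py (lines : List String) : List (List (Int × String)) :=
  pvALoop [] (PySem.List.enumerate lines 1)

-- ===== PORT B =====
def pvNonblank (nl : Int × String) : Bool := !(PySem.Str.strip nl.2 == "")

-- itertools.groupby on the non-blank key: the maximal runs of non-blank numbered lines
def pvBlocks : List (Int × String) → List (List (Int × String))
  | [] => []
  | nl :: rest =>
    if pvNonblank nl then
      (nl :: rest.takeWhile pvNonblank) :: pvBlocks (rest.dropWhile pvNonblank)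
    else
      pvBlocks rest
termination_by ms => ms.length
decreasing_by
  · exact Nat.lt_succ_of_le ((List.dropWhile_sublist _).length_le)
  · exact Nat.lt_succ_self _

def pvStanza (blk : List (Int × String)) : List (Int × String) :=
  blk.filterMap (fun nl =>
    let content := pvBeforeHash nl.2
    if PySem.Str.strip content ≠ "" then some (nl.1, PySem.Str.rstrip content) else none)

def iter_deb822_stanzas_py_alt (lines : List String) : List (List (Int × String)) :=
  (pvBlocks (PySem.List.enumerate lines 1)).filterMap
    (fun blk => let s := pvStanza blk; if s.isEmpty then none else some s)

-- ===== PRECONDITION & SPEC =====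
def Spec_iter_deb822_stanzas_py (lines : List String) (out : List (List (Int × String))) : Prop := out = iter_deb822_stanzas_py_alt lines
instance (lines : List String) (out : List (List (Int × String))) : Decidable (Spec_iter_deb822_stanzas_py lines out) := by unfold Spec_iter_deb822_stanzas_py; infer_instance

-- ===== CLAIM (what is proved, stated in full; the proofs are below) =====
def Claim_equal_iter_deb822_stanzas_py : Prop := ∀ (lines : List String), Dom_iter_deb822_stanzas_py lines → Spec_iter_deb822_stanzas_py lines (iter_deb822_stanzas_py lines)

-- ===== LEMMAS AND PROOFS =====
def pvEmit (s : List (Int × String)) : List (List (Int × String)) :=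
  if s.isEmpty then [] else [s]

def pvAltOn (ms : List (Int × String)) : List (List (Int × String)) :=
  (pvBlocks ms).filterMap (fun blk => let s := pvStanza blk; if s.isEmpty then none else some s)

theorem pvAltOn_unfold (ms : List (Int × String)) :
    pvAltOn ms = pvEmit (pvStanza (ms.takeWhile pvNonblank)) ++ pvAltOn (ms.dropWhile pvNonblank) := by
  cases ms with
  | nil => simp [pvAltOn, pvBlocks, pvStanza, pvEmit]
  | cons nl rest =>
    by_cases h : pvNonblank nl
    · simp only [pvAltOn, pvBlocks, h, if_true, List.filterMap_cons,
        List.takeWhile_cons_of_pos h, List.dropWhile_cons_of_pos h]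
      by_cases he : (pvStanza (nl :: rest.takeWhile pvNonblank)).isEmpty <;>
        simp [pvEmit, he]
    · simp [pvAltOn, pvBlocks, h, List.takeWhile_cons_of_neg h,
        List.dropWhile_cons_of_neg h, pvStanza, pvEmit]

theorem pvALoop_eq (ns : List (Int × String)) : ∀ cur,
    pvALoop cur ns = pvEmit (cur ++ pvStanza (ns.takeWhile pvNonblank)) ++ pvAltOn (ns.dropWhile pvNonblank) := by
  induction ns with
  | nil => intro cur; simp [pvALoop, pvStanza, pvEmit, pvAltOn, pvBlocks]
  | cons nl rest ih =>
    intro cur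
    obtain ⟨n, line⟩ := nl
    by_cases hb : PySem.Str.strip line = ""
    · have hnb : pvNonblank (n, line) = false := by simp [pvNonblank, hb]
      have step : pvALoop cur ((n, line) :: rest) = pvEmit cur ++ pvALoop [] rest := by
        by_cases hc : cur.isEmpty <;> simp_all [pvALoop, pvEmit]
      have hskip : pvAltOn ((n, line) :: rest) = pvAltOn rest := by
        simp [pvAltOn, pvBlocks, hnb]
      rw [step, ih []]
      simp only [List.nil_append]
      rw [← pvAltOn_unfold rest,
        List.takeWhile_cons_of_neg (by simp [hnb]),
        List.dropWhile_cons_of_neg (by simp [hnb]), hskip]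
      simp [pvStanza, pvEmit]
    · have hnb : pvNonblank (n, line) = true := by simp [pvNonblank, hb]
      rw [List.takeWhile_cons_of_pos (by simp [hnb]),
        List.dropWhile_cons_of_pos (by simp [hnb])]
      by_cases hcont : PySem.Str.strip (pvBeforeHash line) ≠ ""
      · have step : pvALoop cur ((n, line) :: rest)
            = pvALoop (cur ++ [(n, PySem.Str.rstrip (pvBeforeHash line))]) rest := by
          simp [pvALoop, hb, hcont]
        rw [step, ih]
        simp [pvStanza, hcont]
      · have step : pvALoop cur ((n, line) :: rest) = pvALoop cur rest := by
          simp [pvALoop, hb, hcont]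
        rw [step, ih]
        simp [pvStanza, hcont]

-- ===== VERDICT (by name: the statement is the Claim_ definition above) =====
theorem iter_deb822_stanzas_py_spec : Claim_equal_iter_deb822_stanzas_py := by
  intro lines _
  show iter_deb822_stanzas_py lines = iter_deb822_stanzas_py_alt lines
  have : iter_deb822_stanzas_py_alt lines = pvAltOn (PySem.List.enumerate lines 1) := rfl
  rw [iter_deb822_stanzas_py, this, pvALoop_eq, pvAltOn_unfold (PySem.List.enumerate lines 1)]
  simp
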